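-- pv_equiv track=rewrite | github.com/Rakeshbag7/30-day-challenge-code-and-explanation | problem Day 27 AND OR subarray.py | largest_subarray_or_and
-- ===== SOURCE A (Python) =====
-- def largest_subarray_or_and(n, A, B):
--     max_len = 0  # stores maximum valid subarray length
--     for i in range(n):
--         or_val = 0       # OR of current subarray from A
--         and_val = B[i]   # AND of current subarray from B
--         for j in range(i, n):
--             or_val |= A[j]      # update OR with A[j]
--             and_val &= B[j]     # update AND with B[j]
--             if or_val == and_val:  # check condition
--                 max_len = max(max_len, j - i + 1)  # update max length
--     return max_len
-- ===== SOURCE B (Python) =====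
-- def largest_subarray_or_and(n, A, B):
--     best = 0
--     states = []  # (or, and, length) per distinct (OR,AND) of subarrays ending at j, longest first
--     for j in range(n):
--         a, b = A[j], B[j]
--         new = []
--         prev = None
--         for (o, v, l) in states:
--             o2, v2 = o | a, v & b
--             if prev != (o2, v2):
--                 new.append((o2, v2, l + 1))
--                 prev = (o2, v2)
--         if prev != (a, b):
--             new.append((a, b, 1))
--         states = new
--         for (o, v, l) in states:
--             if o == v and l > best:
--                 best = l
--     return best
-- ===== Notes on version B (the rewrite author's own statement) =====
-- stated objective: faster
-- what changed: Instead of restarting an OR/AND scan from every start index, B makes one pass over end positions maintaining a compressed list of the distinct (OR-of-A, AND-of-B) value pairs over all subarrays ending there (with the longest length for each pair), exploiting that these pairs take only O(log M) distinct values per end.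
import Mathlib
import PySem

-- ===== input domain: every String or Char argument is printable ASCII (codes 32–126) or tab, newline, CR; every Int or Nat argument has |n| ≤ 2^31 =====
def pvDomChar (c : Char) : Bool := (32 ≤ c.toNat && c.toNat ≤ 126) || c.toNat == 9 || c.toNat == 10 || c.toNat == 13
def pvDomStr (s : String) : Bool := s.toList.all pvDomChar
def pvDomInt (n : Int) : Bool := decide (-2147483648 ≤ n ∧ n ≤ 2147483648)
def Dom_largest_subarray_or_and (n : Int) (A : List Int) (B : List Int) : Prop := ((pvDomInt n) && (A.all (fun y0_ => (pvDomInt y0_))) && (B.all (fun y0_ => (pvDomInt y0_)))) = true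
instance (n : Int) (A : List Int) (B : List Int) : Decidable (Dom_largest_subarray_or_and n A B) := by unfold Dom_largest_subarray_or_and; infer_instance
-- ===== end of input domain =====

-- B replaces A's quadratic restart-per-start scan by one pass over end positions that
-- maintains the compressed list of distinct (OR-of-A, AND-of-B) value pairs of subarrays
-- ending there; a timing run measured it faster.

-- ===== PORT A =====
def largest_subarray_or_and (n : Int) (A : List Int) (B : List Int) : Int :=
  (PySem.List.pyRange 0 n 1).foldl (fun max_len i =>
    ((PySem.List.pyRange i n 1).foldl
      (fun (st : Int × Int × Int) j =>
        let or_val := PySem.Int.bor st.1 (PySem.List.pyGetD A j 0)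
        let and_val := PySem.Int.band st.2.1 (PySem.List.pyGetD B j 0)
        (or_val, and_val,
          if or_val = and_val then max st.2.2 (j - i + 1) else st.2.2))
      (0, PySem.List.pyGetD B i 0, max_len)).2.2) 0


-- ===== PORT B =====
def largest_subarray_or_and_alt (n : Int) (A : List Int) (B : List Int) : Int :=
  ((PySem.List.pyRange 0 n 1).foldl
    (fun (st : Int × List (Int × Int × Int)) j =>
      let a := PySem.List.pyGetD A j 0
      let b := PySem.List.pyGetD B j 0
      let np := st.2.foldl
        (fun (np : List (Int × Int × Int) × Option (Int × Int)) s =>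
          let o2 := PySem.Int.bor s.1 a
          let v2 := PySem.Int.band s.2.1 b
          if np.2 = some (o2, v2) then np
          else (np.1 ++ [(o2, v2, s.2.2 + 1)], some (o2, v2)))
        ([], none)
      let states := if np.2 = some (a, b) then np.1 else np.1 ++ [(a, b, 1)]
      let best := states.foldl
        (fun best s => if s.1 = s.2.1 ∧ best < s.2.2 then s.2.2 else best) st.1
      (best, states))
    (0, [])).1


-- ===== PRECONDITION & SPEC =====
-- Pre_ excludes exactly the inputs where Python A raises IndexError: n larger than a list length (with n ≥ 1).
def Pre_largest_subarray_or_and (n : Int) (A : List Int) (B : List Int) : Prop :=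
  n ≤ 0 ∨ (n ≤ (A.length : Int) ∧ n ≤ (B.length : Int))
instance (n : Int) (A : List Int) (B : List Int) : Decidable (Pre_largest_subarray_or_and n A B) := by
  unfold Pre_largest_subarray_or_and; infer_instance
def pvWitness_largest_subarray_or_and : Int × List Int × List Int := (2, [1, 3], [1, 3])
def Spec_largest_subarray_or_and (n : Int) (A : List Int) (B : List Int) (out : Int) : Prop := out = largest_subarray_or_and_alt n A B
instance (n : Int) (A : List Int) (B : List Int) (out : Int) : Decidable (Spec_largest_subarray_or_and n A B out) := by unfold Spec_largest_subarray_or_and; infer_instance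

-- ===== CLAIM (what is proved, stated in full; the proofs are below) =====
def Claim_equal_largest_subarray_or_and : Prop := ∀ (n : Int) (A : List Int) (B : List Int), Dom_largest_subarray_or_and n A B → Pre_largest_subarray_or_and n A B → Spec_largest_subarray_or_and n A B (largest_subarray_or_and n A B)

-- ===== LEMMAS AND PROOFS =====
def pvAt (A : List Int) (k : Int) : Int := PySem.List.pyGetD A k 0
def gOr (A : List Int) (i c : Int) : Int :=
  (PySem.List.pyRange i c 1).foldl (fun acc k => PySem.Int.bor acc (pvAt A k)) 0
def gAnd (B : List Int) (i c : Int) : Int :=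
  (PySem.List.pyRange i c 1).foldl (fun acc k => PySem.Int.band acc (pvAt B k)) (pvAt B i)
lemma gOr_succ (A : List Int) {i c : Int} (h : i ≤ c) :
    gOr A i (c + 1) = PySem.Int.bor (gOr A i c) (pvAt A c) := by
  unfold gOr; rw [PySem.List.pyRange_one_succ_right h, List.foldl_append]; rfl
lemma gAnd_succ (B : List Int) {i c : Int} (h : i ≤ c) :
    gAnd B i (c + 1) = PySem.Int.band (gAnd B i c) (pvAt B c) := by
  unfold gAnd; rw [PySem.List.pyRange_one_succ_right h, List.foldl_append]; rfl
lemma gOr_self (A : List Int) (i : Int) : gOr A i i = 0 := by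
  unfold gOr; rw [PySem.List.pyRange_one_eq_nil (le_refl i)]; rfl
lemma gAnd_self (B : List Int) (i : Int) : gAnd B i i = pvAt B i := by
  unfold gAnd; rw [PySem.List.pyRange_one_eq_nil (le_refl i)]; rfl
lemma gOr_base (A : List Int) (c : Int) : gOr A c (c + 1) = pvAt A c := by
  unfold gOr; rw [PySem.List.pyRange_one_singleton]; simp [PySem.Int.bor_comm]
lemma gAnd_base (B : List Int) (c : Int) : gAnd B c (c + 1) = pvAt B c := by
  unfold gAnd; rw [PySem.List.pyRange_one_singleton]; simp

def rowStep (A B : List Int) (i : Int) (st : Int × Int × Int) (j : Int) : Int × Int × Int :=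
  let or_val := PySem.Int.bor st.1 (PySem.List.pyGetD A j 0)
  let and_val := PySem.Int.band st.2.1 (PySem.List.pyGetD B j 0)
  (or_val, and_val, if or_val = and_val then max st.2.2 (j - i + 1) else st.2.2)

def rowF (A B : List Int) (i c m : Int) : Int × Int × Int :=
  (PySem.List.pyRange i c 1).foldl (rowStep A B i) (0, PySem.List.pyGetD B i 0, m)

lemma rowF_spec (A B : List Int) (i : Int) :
    ∀ (cN : Nat) (m : Int),
      (rowF A B i (i + (cN : Int)) m).1 = gOr A i (i + (cN : Int)) ∧
      (rowF A B i (i + (cN : Int)) m).2.1 = gAnd B i (i + (cN : Int)) ∧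
      m ≤ (rowF A B i (i + (cN : Int)) m).2.2 ∧
      (∀ c', i < c' → c' ≤ i + (cN : Int) → gOr A i c' = gAnd B i c' →
        c' - i ≤ (rowF A B i (i + (cN : Int)) m).2.2) ∧
      ((rowF A B i (i + (cN : Int)) m).2.2 = m ∨
        ∃ c', i < c' ∧ c' ≤ i + (cN : Int) ∧ gOr A i c' = gAnd B i c' ∧
          (rowF A B i (i + (cN : Int)) m).2.2 = c' - i) := by
  intro cN
  induction cN with
  | zero =>
    intro m
    simp only [Nat.cast_zero, add_zero]
    unfold rowF
    rw [PySem.List.pyRange_one_eq_nil (le_refl i)]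
    exact ⟨(gOr_self A i).symm, (gAnd_self B i).symm ▸ rfl, le_refl m,
      fun c' h1 h2 _ => absurd h2 (by omega), Or.inl rfl⟩
  | succ k ih =>
    intro m
    obtain ⟨h1, h2, h3, h4, h5⟩ := ih m
    have hik : i ≤ i + (k : Int) := by omega
    have hcast : i + ((k + 1 : Nat) : Int) = (i + (k : Int)) + 1 := by push_cast; ring
    rw [hcast]
    have hunf : rowF A B i ((i + (k : Int)) + 1) m
        = rowStep A B i (rowF A B i (i + (k : Int)) m) (i + (k : Int)) := by
      unfold rowF
      rw [PySem.List.pyRange_one_succ_right hik, List.foldl_append, List.foldl_cons,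
        List.foldl_nil]
    rw [hunf]
    set r0 := rowF A B i (i + (k : Int)) m with hr0
    set c0 := i + (k : Int) with hc0
    have hor : (rowStep A B i r0 c0).1 = gOr A i (c0 + 1) := by
      rw [gOr_succ A hik, ← h1]; rfl
    have hand : (rowStep A B i r0 c0).2.1 = gAnd B i (c0 + 1) := by
      rw [gAnd_succ B hik, ← h2]; rfl
    have hthird : (rowStep A B i r0 c0).2.2 =
        if gOr A i (c0 + 1) = gAnd B i (c0 + 1) then max r0.2.2 (c0 - i + 1) else r0.2.2 := by
      rw [← hor, ← hand]; rfl
    refine ⟨hor, hand, ?_, ?_, ?_⟩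
    · rw [hthird]; split_ifs
      · omega
      · exact h3
    · intro c' hc'1 hc'2 hg
      rw [hthird]
      rcases (by omega : c' ≤ c0 ∨ c' = c0 + 1) with hle | rfl
      · have := h4 c' hc'1 hle hg
        split_ifs <;> omega
      · rw [if_pos hg]; omega
    · rw [hthird]
      split_ifs with hg
      · rcases le_or_gt (c0 - i + 1) r0.2.2 with hle | hlt
        · rw [max_eq_left hle]
          rcases h5 with h5 | ⟨c', hx1, hx2, hx3, hx4⟩
          · exact Or.inl h5
          · exact Or.inr ⟨c', hx1, by omega, hx3, hx4⟩
        · rw [max_eq_right (by omega)]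
          exact Or.inr ⟨c0 + 1, by omega, le_refl _, hg, by omega⟩
      · rcases h5 with h5 | ⟨c', hx1, hx2, hx3, hx4⟩
        · exact Or.inl h5
        · exact Or.inr ⟨c', hx1, by omega, hx3, hx4⟩

def outerF (n : Int) (A B : List Int) (c m : Int) : Int :=
  (PySem.List.pyRange 0 c 1).foldl (fun max_len i => (rowF A B i n max_len).2.2) m

def IsBest (n : Int) (A B : List Int) (r : Int) : Prop :=
  0 ≤ r ∧
  (∀ i c, 0 ≤ i → i < c → c ≤ n → gOr A i c = gAnd B i c → c - i ≤ r) ∧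
  (r = 0 ∨ ∃ i c, 0 ≤ i ∧ i < c ∧ c ≤ n ∧ gOr A i c = gAnd B i c ∧ r = c - i)

lemma outerF_spec (n : Int) (A B : List Int) :
    ∀ (cN : Nat), (cN : Int) ≤ n → ∀ (m : Int),
      m ≤ outerF n A B (cN : Int) m ∧
      (∀ i c, 0 ≤ i → i < (cN : Int) → i < c → c ≤ n → gOr A i c = gAnd B i c →
        c - i ≤ outerF n A B (cN : Int) m) ∧
      (outerF n A B (cN : Int) m = m ∨
        ∃ i c, 0 ≤ i ∧ i < (cN : Int) ∧ i < c ∧ c ≤ n ∧ gOr A i c = gAnd B i c ∧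
          outerF n A B (cN : Int) m = c - i) := by
  intro cN
  induction cN with
  | zero =>
    intro _ m
    unfold outerF
    rw [Nat.cast_zero, PySem.List.pyRange_one_eq_nil (le_refl 0), List.foldl_nil]
    exact ⟨le_refl m, fun i c h1 h2 => absurd h2 (by omega), Or.inl rfl⟩
  | succ k ih =>
    intro hkn m
    have hk : (0 : Int) ≤ (k : Int) := by positivity
    have hkn' : (k : Int) ≤ n := by push_cast at hkn ⊢; omega
    obtain ⟨h1, h2, h3⟩ := ih (by omega) m
    have hcast : ((k + 1 : Nat) : Int) = (k : Int) + 1 := by push_cast; ring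
    have hunf : outerF n A B ((k + 1 : Nat) : Int) m
        = (rowF A B (k : Int) n (outerF n A B (k : Int) m)).2.2 := by
      unfold outerF
      rw [hcast, PySem.List.pyRange_one_succ_right hk, List.foldl_append, List.foldl_cons,
        List.foldl_nil]
    have hn : (k : Int) + (((n - (k : Int)).toNat : Nat) : Int) = n := by
      rw [Int.toNat_of_nonneg (by omega)]; ring
    obtain ⟨_, _, r3, r4, r5⟩ := rowF_spec A B (k : Int) (n - (k : Int)).toNat
      (outerF n A B (k : Int) m)
    rw [hn] at r3 r4 r5
    rw [hunf, hcast]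
    refine ⟨by omega, ?_, ?_⟩
    · intro i c hi hik hic hcn hg
      rcases (by omega : i < (k : Int) ∨ i = (k : Int)) with hlt | rfl
      · have := h2 i c hi hlt hic hcn hg
        omega
      · exact r4 c hic hcn hg
    · rcases r5 with r5 | ⟨c', hx1, hx2, hx3, hx4⟩
      · rw [r5]
        rcases h3 with h3 | ⟨i, c, hy1, hy2, hy3, hy4, hy5, hy6⟩
        · exact Or.inl h3
        · exact Or.inr ⟨i, c, hy1, by omega, hy3, hy4, hy5, hy6⟩
      · exact Or.inr ⟨(k : Int), c', hk, by omega, hx1, hx2, hx3, hx4⟩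

lemma portA_eq (n : Int) (A B : List Int) :
    largest_subarray_or_and n A B = outerF n A B n 0 := rfl

lemma portA_isBest (n : Int) (A B : List Int) :
    IsBest n A B (largest_subarray_or_and n A B) := by
  rw [portA_eq]
  by_cases hn : n ≤ 0
  · have : outerF n A B n 0 = 0 := by
      unfold outerF
      rw [PySem.List.pyRange_one_eq_nil hn, List.foldl_nil]
    rw [this]
    exact ⟨le_refl 0, fun i c h1 h2 h3 _ => by omega, Or.inl rfl⟩
  · have hcast : ((n.toNat : Nat) : Int) = n := Int.toNat_of_nonneg (by omega)
    obtain ⟨h1, h2, h3⟩ := outerF_spec n A B n.toNat (by omega) 0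
    rw [hcast] at h1 h2 h3
    refine ⟨h1, ?_, ?_⟩
    · intro i c hi hic hcn hg
      exact h2 i c hi (by omega) hic hcn hg
    · rcases h3 with h3 | ⟨i, c, hx1, hx2, hx3, hx4, hx5, hx6⟩
      · exact Or.inl h3
      · exact Or.inr ⟨i, c, hx1, hx3, hx4, hx5, hx6⟩

def cStep (a b : Int) (np : List (Int × Int × Int) × Option (Int × Int))
    (s : Int × Int × Int) : List (Int × Int × Int) × Option (Int × Int) :=
  let o2 := PySem.Int.bor s.1 a
  let v2 := PySem.Int.band s.2.1 b
  if np.2 = some (o2, v2) then np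
  else (np.1 ++ [(o2, v2, s.2.2 + 1)], some (o2, v2))

lemma cStep_pos {a b : Int} {np : List (Int × Int × Int) × Option (Int × Int)}
    {s : Int × Int × Int} (h : np.2 = some (PySem.Int.bor s.1 a, PySem.Int.band s.2.1 b)) :
    cStep a b np s = np := by simp [cStep, h]

lemma cStep_neg {a b : Int} {np : List (Int × Int × Int) × Option (Int × Int)}
    {s : Int × Int × Int} (h : ¬ np.2 = some (PySem.Int.bor s.1 a, PySem.Int.band s.2.1 b)) :
    cStep a b np s
      = (np.1 ++ [(PySem.Int.bor s.1 a, PySem.Int.band s.2.1 b, s.2.2 + 1)],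
         some (PySem.Int.bor s.1 a, PySem.Int.band s.2.1 b)) := by simp [cStep, h]

lemma comp_aux (a b : Int) :
    ∀ (l : List (Int × Int × Int)) (acc : List (Int × Int × Int) × Option (Int × Int)),
      acc.2 = acc.1.getLast?.map (fun e => (e.1, e.2.1)) →
      acc.1.Pairwise (fun s t => t.2.2 < s.2.2) →
      (∀ e ∈ acc.1, ∀ s ∈ l, s.2.2 + 1 < e.2.2) →
      l.Pairwise (fun s t => t.2.2 < s.2.2) →
      (∃ t, (l.foldl (cStep a b) acc).1 = acc.1 ++ t ∧
        ∀ e ∈ t, ∃ s ∈ l, e = (PySem.Int.bor s.1 a, PySem.Int.band s.2.1 b, s.2.2 + 1)) ∧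
      (∀ s ∈ l, ∃ e ∈ (l.foldl (cStep a b) acc).1,
        e.1 = PySem.Int.bor s.1 a ∧ e.2.1 = PySem.Int.band s.2.1 b ∧
        s.2.2 + 1 ≤ e.2.2) ∧
      (l.foldl (cStep a b) acc).1.Pairwise (fun s t => t.2.2 < s.2.2) ∧
      (l.foldl (cStep a b) acc).2
        = (l.foldl (cStep a b) acc).1.getLast?.map (fun e => (e.1, e.2.1)) := by
  intro l
  induction l with
  | nil =>
    intro acc hlast hpw _ _
    exact ⟨⟨[], by simp, by simp⟩, by simp, hpw, hlast⟩
  | cons s0 t ih =>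
    intro acc hlast hpw hgap hlpw
    simp only [List.foldl_cons]
    by_cases hd : acc.2 = some (PySem.Int.bor s0.1 a, PySem.Int.band s0.2.1 b)
    · rw [cStep_pos hd]
      obtain ⟨⟨t', ht1, ht2⟩, hcomp, hpw', hlast'⟩ := ih acc hlast hpw
        (fun e he s hs => hgap e he s (List.mem_cons_of_mem _ hs)) hlpw.tail
      refine ⟨⟨t', ht1, fun e he => ?_⟩, ?_, hpw', hlast'⟩
      · obtain ⟨s, hs, he'⟩ := ht2 e he
        exact ⟨s, List.mem_cons_of_mem _ hs, he'⟩
      · intro s hs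
        rcases List.mem_cons.1 hs with rfl | hs
        · -- s0 was merged into the last element of acc.1
          rw [hd] at hlast
          obtain ⟨e, he1, he2⟩ := Option.map_eq_some_iff.1 hlast.symm
          have hemem : e ∈ acc.1 := List.mem_of_getLast? he1
          refine ⟨e, by rw [ht1]; exact List.mem_append_left _ hemem, ?_, ?_, ?_⟩
          · exact congrArg Prod.fst he2
          · exact congrArg Prod.snd he2
          · have := hgap e hemem s (List.mem_cons_self ..)
            omega
        · exact hcomp s hs
    · rw [cStep_neg hd]
      set x : Int × Int × Int :=
        (PySem.Int.bor s0.1 a, PySem.Int.band s0.2.1 b, s0.2.2 + 1) with hx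
      have hxgap : ∀ e ∈ acc.1, x.2.2 < e.2.2 := fun e he =>
        hgap e he s0 (List.mem_cons_self ..)
      have hlast'' : (acc.1 ++ [x], some (x.1, x.2.1)).2
          = (acc.1 ++ [x], some (x.1, x.2.1)).1.getLast?.map (fun e => (e.1, e.2.1)) := by
        simp
      have hpw'' : (acc.1 ++ [x]).Pairwise (fun s t => t.2.2 < s.2.2) := by
        rw [List.pairwise_append]
        exact ⟨hpw, List.pairwise_singleton _ _, fun e he y hy => by
          rw [List.mem_singleton.1 hy]; exact hxgap e he⟩
      have hgap'' : ∀ e ∈ acc.1 ++ [x], ∀ s ∈ t, s.2.2 + 1 < e.2.2 := by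
        intro e he s hs
        rcases List.mem_append.1 he with he | he
        · exact hgap e he s (List.mem_cons_of_mem _ hs)
        · rw [List.mem_singleton.1 he]
          have : s.2.2 < s0.2.2 := List.rel_of_pairwise_cons hlpw hs
          simp only [hx]
          omega
      obtain ⟨⟨t', ht1, ht2⟩, hcomp, hpw', hlast'⟩ :=
        ih (acc.1 ++ [x], some (x.1, x.2.1)) hlast'' hpw'' hgap'' hlpw.tail
      refine ⟨⟨[x] ++ t', by rw [ht1, List.append_assoc], fun e he => ?_⟩, ?_, hpw', hlast'⟩
      · rcases List.mem_append.1 he with he | he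
        · rw [List.mem_singleton.1 he]
          exact ⟨s0, List.mem_cons_self .., rfl⟩
        · obtain ⟨s, hs, he'⟩ := ht2 e he
          exact ⟨s, List.mem_cons_of_mem _ hs, he'⟩
      · intro s hs
        rcases List.mem_cons.1 hs with rfl | hs
        · refine ⟨x, ?_, rfl, rfl, le_refl _⟩
          rw [ht1]
          exact List.mem_append_left _ (List.mem_append_right _ (List.mem_singleton_self x))
        · exact hcomp s hs

lemma bestFold_spec (l : List (Int × Int × Int)) :
    ∀ (m : Int),
      m ≤ l.foldl (fun best s => if s.1 = s.2.1 ∧ best < s.2.2 then s.2.2 else best) m ∧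
      (∀ s ∈ l, s.1 = s.2.1 →
        s.2.2 ≤ l.foldl (fun best s => if s.1 = s.2.1 ∧ best < s.2.2 then s.2.2 else best) m) ∧
      (l.foldl (fun best s => if s.1 = s.2.1 ∧ best < s.2.2 then s.2.2 else best) m = m ∨
        ∃ s ∈ l, s.1 = s.2.1 ∧
          l.foldl (fun best s => if s.1 = s.2.1 ∧ best < s.2.2 then s.2.2 else best) m = s.2.2) := by
  induction l with
  | nil => intro m; simp
  | cons s0 t ih =>
    intro m
    simp only [List.foldl_cons]
    by_cases hc : s0.1 = s0.2.1 ∧ m < s0.2.2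
    · rw [if_pos hc]
      obtain ⟨h1, h2, h3⟩ := ih s0.2.2
      refine ⟨by omega, ?_, ?_⟩
      · intro s hs heq
        rcases List.mem_cons.1 hs with rfl | hs
        · omega
        · exact h2 s hs heq
      · rcases h3 with h3 | ⟨s, hs, hse, hr⟩
        · exact Or.inr ⟨s0, List.mem_cons_self .., hc.1, h3⟩
        · exact Or.inr ⟨s, List.mem_cons_of_mem _ hs, hse, hr⟩
    · rw [if_neg hc]
      obtain ⟨h1, h2, h3⟩ := ih m
      refine ⟨h1, ?_, ?_⟩
      · intro s hs heq
        rcases List.mem_cons.1 hs with rfl | hs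
        · have : ¬ m < s.2.2 := fun hlt => hc ⟨heq, hlt⟩
          omega
        · exact h2 s hs heq
      · rcases h3 with h3 | ⟨s, hs, hse, hr⟩
        · exact Or.inl h3
        · exact Or.inr ⟨s, List.mem_cons_of_mem _ hs, hse, hr⟩

def InvB (A B : List Int) (c : Int) (st : Int × List (Int × Int × Int)) : Prop :=
  (∀ s ∈ st.2, ∃ i, 0 ≤ i ∧ i < c ∧ s = (gOr A i c, gAnd B i c, c - i)) ∧
  (∀ i, 0 ≤ i → i < c → ∃ s ∈ st.2, s.1 = gOr A i c ∧ s.2.1 = gAnd B i c ∧ c - i ≤ s.2.2) ∧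
  st.2.Pairwise (fun s t => t.2.2 < s.2.2) ∧
  0 ≤ st.1 ∧
  (∀ i c', 0 ≤ i → i < c' → c' ≤ c → gOr A i c' = gAnd B i c' → c' - i ≤ st.1) ∧
  (st.1 = 0 ∨ ∃ i c', 0 ≤ i ∧ i < c' ∧ c' ≤ c ∧ gOr A i c' = gAnd B i c' ∧ st.1 = c' - i)

def bStep (A B : List Int) (st : Int × List (Int × Int × Int)) (j : Int) :
    Int × List (Int × Int × Int) :=
  let a := PySem.List.pyGetD A j 0
  let b := PySem.List.pyGetD B j 0
  let np := st.2.foldl (cStep a b) ([], none)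
  let states := if np.2 = some (a, b) then np.1 else np.1 ++ [(a, b, 1)]
  let best := states.foldl
    (fun best s => if s.1 = s.2.1 ∧ best < s.2.2 then s.2.2 else best) st.1
  (best, states)

lemma invB_step (A B : List Int) (c : Int) (hc : 0 ≤ c) (best : Int)
    (states : List (Int × Int × Int)) (h : InvB A B c (best, states)) :
    InvB A B (c + 1) (bStep A B (best, states) c) := by
  obtain ⟨inv1, inv2, inv3, inv4, inv5, inv6⟩ := h
  simp only at inv1 inv2 inv3 inv4 inv5 inv6
  set a := PySem.List.pyGetD A c 0 with ha
  set b := PySem.List.pyGetD B c 0 with hbdef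
  set np := states.foldl (cStep a b) ([], none) with hnp
  set S := if np.2 = some (a, b) then np.1 else np.1 ++ [(a, b, 1)] with hS
  have hstep : bStep A B (best, states) c
      = (S.foldl (fun best s => if s.1 = s.2.1 ∧ best < s.2.2 then s.2.2 else best) best, S) :=
    rfl
  rw [hstep]
  obtain ⟨⟨t, ht1, horig⟩, hcomp, hpw, hlast⟩ := comp_aux a b states ([], none)
    rfl List.Pairwise.nil (by simp) inv3
  rw [List.nil_append] at ht1
  -- soundness of the mapped-and-compressed list at c + 1
  have hsound_np : ∀ e ∈ np.1, ∃ i, 0 ≤ i ∧ i < c ∧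
      e = (gOr A i (c + 1), gAnd B i (c + 1), (c + 1) - i) := by
    intro e he
    rw [ht1] at he
    obtain ⟨s, hs, rfl⟩ := horig e he
    obtain ⟨i, hi0, hic, rfl⟩ := inv1 s hs
    refine ⟨i, hi0, hic, ?_⟩
    have h1 : PySem.Int.bor (gOr A i c) a = gOr A i (c + 1) := (gOr_succ A (by omega)).symm
    have h2 : PySem.Int.band (gAnd B i c) b = gAnd B i (c + 1) := (gAnd_succ B (by omega)).symm
    simp only [h1, h2]
    have : c - i + 1 = (c + 1) - i := by ring
    rw [this]
  -- soundness of S at c + 1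
  have hsound : ∀ s ∈ S, ∃ i, 0 ≤ i ∧ i < c + 1 ∧
      s = (gOr A i (c + 1), gAnd B i (c + 1), (c + 1) - i) := by
    intro e he
    rw [hS] at he
    have hbase : ((a, b, 1) : Int × Int × Int)
        = (gOr A c (c + 1), gAnd B c (c + 1), (c + 1) - c) := by
      rw [gOr_base, gAnd_base]
      have h1 : c + 1 - c = (1 : Int) := by omega
      rw [h1]
      rfl
    split_ifs at he with happ
    · obtain ⟨i, h1, h2, h3⟩ := hsound_np e he
      exact ⟨i, h1, by omega, h3⟩
    · rcases List.mem_append.1 he with he | he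
      · obtain ⟨i, h1, h2, h3⟩ := hsound_np e he
        exact ⟨i, h1, by omega, h3⟩
      · rw [List.mem_singleton.1 he, hbase]
        exact ⟨c, hc, by omega, rfl⟩
  -- every element of np.1 stays in S
  have hsub : ∀ e ∈ np.1, e ∈ S := by
    intro e he
    rw [hS]
    split_ifs
    · exact he
    · exact List.mem_append_left _ he
  -- completeness of S at c + 1
  have hcompl : ∀ i, 0 ≤ i → i < c + 1 → ∃ s ∈ S,
      s.1 = gOr A i (c + 1) ∧ s.2.1 = gAnd B i (c + 1) ∧ (c + 1) - i ≤ s.2.2 := by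
    intro i hi0 hic1
    rcases (by omega : i < c ∨ i = c) with hic | hieq
    · obtain ⟨s, hs, hs1, hs2, hs3⟩ := inv2 i hi0 hic
      obtain ⟨e, he, he1, he2, he3⟩ := hcomp s hs
      refine ⟨e, hsub e he, ?_, ?_, by omega⟩
      · rw [he1, hs1]; exact (gOr_succ A (by omega)).symm
      · rw [he2, hs2]; exact (gAnd_succ B (by omega)).symm
    · subst hieq
      by_cases happ : np.2 = some (a, b)
      · rw [hlast] at happ
        obtain ⟨e, he1, he2⟩ := Option.map_eq_some_iff.1 happ
        have hemem : e ∈ np.1 := List.mem_of_getLast? he1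
        obtain ⟨i0, hx1, hx2, hx3⟩ := hsound_np e hemem
        have hce1 : e.1 = a := congrArg Prod.fst he2
        have hce2 : e.2.1 = b := congrArg Prod.snd he2
        have hga : a = gOr A i (i + 1) := (gOr_base A i).symm
        have hgb : b = gAnd B i (i + 1) := (gAnd_base B i).symm
        have h22 : e.2.2 = i + 1 - i0 := by rw [hx3]
        exact ⟨e, hsub e hemem, by rw [hce1, hga], by rw [hce2, hgb], by omega⟩
      · have hga : a = gOr A i (i + 1) := (gOr_base A i).symm
        have hgb : b = gAnd B i (i + 1) := (gAnd_base B i).symm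
        refine ⟨(a, b, 1), ?_, by rw [← hga], by rw [← hgb], by norm_num⟩
        · rw [hS, if_neg happ]
          exact List.mem_append_right _ (List.mem_singleton_self _)
  -- lengths strictly decreasing in S
  have hSpw : S.Pairwise (fun s t => t.2.2 < s.2.2) := by
    rw [hS]
    split_ifs
    · exact hpw
    · rw [List.pairwise_append]
      refine ⟨hpw, List.pairwise_singleton _ _, ?_⟩
      intro e he y hy
      rw [List.mem_singleton.1 hy]
      obtain ⟨i, h1, h2, h3⟩ := hsound_np e he
      have : e.2.2 = (c + 1) - i := by rw [h3]
      simp only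
      omega
  obtain ⟨b1, b2, b3⟩ := bestFold_spec S best
  refine ⟨hsound, hcompl, hSpw, by omega, ?_, ?_⟩
  · -- upper bound
    intro i c' hi0 hic' hc'c hg
    rcases (by omega : c' ≤ c ∨ c' = c + 1) with hle | rfl
    · have := inv5 i c' hi0 hic' hle hg
      omega
    · obtain ⟨s, hs, hs1, hs2, hs3⟩ := hcompl i hi0 hic'
      have := b2 s hs (by rw [hs1, hs2, hg])
      omega
  · -- attainment
    rcases b3 with b3 | ⟨s, hs, hse, hbv⟩
    · rw [b3]
      rcases inv6 with h6 | ⟨i, c', hx1, hx2, hx3, hx4, hx5⟩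
      · exact Or.inl h6
      · exact Or.inr ⟨i, c', hx1, hx2, by omega, hx4, hx5⟩
    · obtain ⟨i, h1, h2, h3⟩ := hsound s hs
      refine Or.inr ⟨i, c + 1, h1, h2, le_refl _, ?_, ?_⟩
      · have e1 : s.1 = gOr A i (c + 1) := by rw [h3]
        have e2 : s.2.1 = gAnd B i (c + 1) := by rw [h3]
        rw [← e1, ← e2, hse]
      · have : s.2.2 = (c + 1) - i := by rw [h3]
        omega

lemma invB_fold (A B : List Int) : ∀ (cN : Nat),
    InvB A B (cN : Int) ((PySem.List.pyRange 0 (cN : Int) 1).foldl (bStep A B) (0, [])) := by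
  intro cN
  induction cN with
  | zero =>
    rw [Nat.cast_zero, PySem.List.pyRange_one_eq_nil (le_refl 0), List.foldl_nil]
    exact ⟨by simp, fun i h1 h2 => by omega, List.Pairwise.nil, le_refl 0,
      fun i c' h1 h2 h3 _ => by omega, Or.inl rfl⟩
  | succ k ih =>
    have hk : (0 : Int) ≤ (k : Int) := by positivity
    have hcast : ((k + 1 : Nat) : Int) = (k : Int) + 1 := by push_cast; ring
    rw [hcast, PySem.List.pyRange_one_succ_right hk, List.foldl_append, List.foldl_cons,
      List.foldl_nil]
    exact invB_step A B (k : Int) hk _ _ ih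

lemma portB_eq (n : Int) (A B : List Int) :
    largest_subarray_or_and_alt n A B
      = ((PySem.List.pyRange 0 n 1).foldl (bStep A B) (0, [])).1 := rfl

lemma portB_isBest (n : Int) (A B : List Int) :
    IsBest n A B (largest_subarray_or_and_alt n A B) := by
  rw [portB_eq]
  by_cases hn : n ≤ 0
  · rw [PySem.List.pyRange_one_eq_nil hn, List.foldl_nil]
    exact ⟨le_refl 0, fun i c h1 h2 h3 _ => by omega, Or.inl rfl⟩
  · have hcast : ((n.toNat : Nat) : Int) = n := Int.toNat_of_nonneg (by omega)
    obtain ⟨_, _, _, h4, h5, h6⟩ := invB_fold A B n.toNat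
    rw [hcast] at h4 h5 h6
    exact ⟨h4, h5, h6⟩

lemma isBest_unique {n : Int} {A B : List Int} {r r' : Int}
    (h : IsBest n A B r) (h' : IsBest n A B r') : r = r' := by
  obtain ⟨h0, hub, hat⟩ := h
  obtain ⟨h0', hub', hat'⟩ := h'
  rcases hat with rfl | ⟨i, c, hi, hic, hcn, hg, rfl⟩ <;>
    rcases hat' with rfl | ⟨i', c', hi', hic', hcn', hg', rfl⟩
  · rfl
  · have := hub i' c' hi' hic' hcn' hg'; omega
  · have := hub' i c hi hic hcn hg; omega
  · have := hub i' c' hi' hic' hcn' hg'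
    have := hub' i c hi hic hcn hg
    omega


-- ===== VERDICT (by name: the statement is the Claim_ definition above) =====
theorem largest_subarray_or_and_spec : Claim_equal_largest_subarray_or_and := by
  intro n A B _ _
  unfold Spec_largest_subarray_or_and
  exact isBest_unique (portA_isBest n A B) (portB_isBest n A B)
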